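-- pv_equiv track=rewrite | github.com/itoh5588/Orthox-64 | scripts/build_rootfs_retrofs.py | choose_total_sectors
-- ===== SOURCE A (Python) =====
-- import math
--
-- SECTOR_SIZE = 512
--
-- MIN_IMAGE_SECTORS = 4096
--
-- def choose_total_sectors(used_without_map: int, extra_sectors: int) -> tuple[int, int]:
--     total = max(MIN_IMAGE_SECTORS, used_without_map + extra_sectors + 1)
--     while True:
--         map_sectors = math.ceil(total / 8 / SECTOR_SIZE)
--         new_total = max(MIN_IMAGE_SECTORS, used_without_map + extra_sectors + map_sectors)
--         if new_total == total:
--             return total, map_sectors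
--         total = new_total
-- ===== SOURCE B (Python) =====
-- SECTOR_SIZE = 512
-- MIN_IMAGE_SECTORS = 4096
--
-- def choose_total_sectors(used_without_map: int, extra_sectors: int) -> tuple[int, int]:
--     base = used_without_map + extra_sectors
--     # least fixed point: map m = ceil(base / (8*SECTOR_SIZE - 1)), computed with exact integer ceiling division
--     m = -(-base // (8 * SECTOR_SIZE - 1))
--     total = base + m
--     if total < MIN_IMAGE_SECTORS:
--         total = MIN_IMAGE_SECTORS
--     map_sectors = -(-total // (8 * SECTOR_SIZE))
--     return total, map_sectors
-- ===== Notes on version B (the rewrite author's own statement) =====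
-- stated objective: simpler
-- what changed: Replaces A's while-loop fixed-point iteration with a closed-form least fixed point: m = ceil(base/4095) via integer ceiling division, total = max(MIN, base+m), map recomputed from the final total.
import Mathlib
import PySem

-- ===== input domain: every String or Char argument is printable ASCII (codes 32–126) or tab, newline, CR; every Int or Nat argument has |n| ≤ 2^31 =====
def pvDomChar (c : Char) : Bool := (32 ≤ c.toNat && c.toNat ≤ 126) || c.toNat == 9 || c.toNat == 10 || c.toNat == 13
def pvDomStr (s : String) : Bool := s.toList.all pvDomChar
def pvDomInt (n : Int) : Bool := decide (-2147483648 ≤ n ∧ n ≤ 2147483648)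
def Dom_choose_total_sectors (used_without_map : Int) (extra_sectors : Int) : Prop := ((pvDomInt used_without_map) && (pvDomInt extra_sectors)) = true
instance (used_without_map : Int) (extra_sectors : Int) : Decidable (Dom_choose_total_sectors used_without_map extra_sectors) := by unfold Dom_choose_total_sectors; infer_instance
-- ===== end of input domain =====

-- B replaces A's fixed-point iteration by a closed-form least-fixed-point formula (objective: simpler).

-- ===== PORT A =====
-- math.ceil(total / 8 / 512): on the admitted domain (|int| ≤ 2^31, so total < 2^53) the two
-- float divisions by powers of two are exact, and the value is the integer ceiling -((-total) // 4096).
def pyCeilDiv (a b : Int) : Int := -(PySem.Int.floordiv (-a) b)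

-- the 'while True' loop of A, with a fuel guard that only makes the same computation total
-- (the loop strictly increases total towards the fixed point; on the admitted domain
--  fewer than 2000000 steps ever happen, see ctsLoop_eq below)
def ctsLoop : Nat → Int → Int → Int × Int
  | 0, _, total => (total, pyCeilDiv total 4096)
  | fuel+1, base, total =>
      let map_sectors := pyCeilDiv total 4096
      let new_total := max 4096 (base + map_sectors)
      if new_total = total then (total, map_sectors)
      else ctsLoop fuel base new_total

def choose_total_sectors (used_without_map : Int) (extra_sectors : Int) : Int × Int :=
  ctsLoop 2000000 (used_without_map + extra_sectors)
    (max 4096 (used_without_map + extra_sectors + 1))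

-- ===== PORT B =====
def choose_total_sectors_alt (used_without_map : Int) (extra_sectors : Int) : Int × Int :=
  let base := used_without_map + extra_sectors
  let m := -(PySem.Int.floordiv (-base) (8 * 512 - 1))
  let total0 := base + m
  let total := if total0 < 4096 then 4096 else total0
  (total, -(PySem.Int.floordiv (-total) (8 * 512)))

-- ===== PRECONDITION & SPEC =====
def Spec_choose_total_sectors (used_without_map : Int) (extra_sectors : Int) (out : Int × Int) : Prop := out = choose_total_sectors_alt used_without_map extra_sectors
instance (used_without_map : Int) (extra_sectors : Int) (out : Int × Int) : Decidable (Spec_choose_total_sectors used_without_map extra_sectors out) := by unfold Spec_choose_total_sectors; infer_instance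

-- ===== CLAIM (what is proved, stated in full; the proofs are below) =====
def Claim_equal_choose_total_sectors : Prop := ∀ (used_without_map : Int) (extra_sectors : Int), Dom_choose_total_sectors used_without_map extra_sectors → Spec_choose_total_sectors used_without_map extra_sectors (choose_total_sectors used_without_map extra_sectors)

-- ===== LEMMAS AND PROOFS =====

-- ceiling-division bracket: q := -((-a) // b) satisfies (q-1)*b < a ≤ q*b
lemma ceil_char (a b : Int) (hb : 0 < b) :
    (-(PySem.Int.floordiv (-a) b) - 1) * b < a ∧ a ≤ -(PySem.Int.floordiv (-a) b) * b :=
  (PySem.Int.neg_floordiv_neg_eq_iff_of_pos hb).mp rfl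

-- one unfolding step of A's loop at a successor fuel literal
lemma ctsLoop_succ (fuel : Nat) (base total : Int) :
    ctsLoop (fuel + 1) base total =
      (let map := pyCeilDiv total 4096
       let nt := max 4096 (base + map)
       if nt = total then (total, map) else ctsLoop fuel base nt) := rfl

-- A's loop, started anywhere between base+1 and the fixed point base+M, returns (base+M, M)
lemma ctsLoop_eq (base M : Int) (hbase : 4096 ≤ base)
    (hM1 : 4095 * (M - 1) < base) (hM2 : base ≤ 4095 * M) :
    ∀ (fuel : Nat) (total : Int), base + 1 ≤ total → total ≤ base + M →
      (base + M - total).toNat < fuel →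
      ctsLoop fuel base total = (base + M, M) := by
  intro fuel
  induction fuel with
  | zero => intro total _ _ hf; omega
  | succ fuel ih =>
    intro total h1 h2 hf
    have hc := ceil_char total 4096 (by norm_num)
    set map := pyCeilDiv total 4096 with hmap
    have hc1 : (map - 1) * 4096 < total := hc.1
    have hc2 : total ≤ map * 4096 := hc.2
    have hmap1 : 1 ≤ map := by omega
    have hmapM : map ≤ M := by omega
    have hge : total ≤ base + map := by omega
    have hmax : max 4096 (base + map) = base + map := by omega
    have hstep : ctsLoop (fuel + 1) base total =
        if base + map = total then (total, map) else ctsLoop fuel base (base + map) := by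
      simp only [ctsLoop, ← hmap, hmax]
    rw [hstep]
    by_cases heq : base + map = total
    · rw [if_pos heq]
      have ht : total = base + M := by omega
      have hm : map = M := by omega
      rw [ht, hm]
    · rw [if_neg heq]
      exact ih (base + map) (by omega) (by omega) (by omega)

theorem choose_total_sectors_spec : Claim_equal_choose_total_sectors := by
  intro u e hdom
  unfold Spec_choose_total_sectors choose_total_sectors choose_total_sectors_alt
  have hd : -2147483648 ≤ u ∧ u ≤ 2147483648 ∧ -2147483648 ≤ e ∧ e ≤ 2147483648 := by
    simp only [Dom_choose_total_sectors, pvDomInt, Bool.and_eq_true, decide_eq_true_eq] at hdom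
    exact ⟨hdom.1.1, hdom.1.2, hdom.2.1, hdom.2.2⟩
  simp only [show ((8:Int) * 512) = 4096 from rfl, show ((4096:Int) - 1) = 4095 from rfl]
  set base := u + e with hbase
  have hM := ceil_char base 4095 (by norm_num)
  set M := -(PySem.Int.floordiv (-base) (4095 : Int)) with hMdef
  have hM1 : (M - 1) * 4095 < base := hM.1
  have hM2 : base ≤ M * 4095 := hM.2
  by_cases hsmall : base ≤ 4095
  · -- small case: A returns (4096, 1) after one loop step; B's total is pinned to 4096
    have hMle : M ≤ 1 := by omega
    have hmax : max 4096 (base + 1) = 4096 := by omega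
    have hc1 := ceil_char 4096 4096 (by norm_num)
    have hA : ctsLoop 2000000 base 4096 = (4096, 1) := by
      have hceil : pyCeilDiv 4096 4096 = 1 := by unfold pyCeilDiv; omega
      rw [show (2000000 : Nat) = 1999999 + 1 from rfl, ctsLoop_succ]
      simp only [hceil, hmax, if_true]
    rw [hmax, hA]
    have htot : (if base + M < 4096 then (4096 : Int) else base + M) = 4096 := by
      split_ifs <;> omega
    rw [htot]
    have hm2 : -(PySem.Int.floordiv (-(4096 : Int)) 4096) = 1 := by omega
    rw [hm2]
  · -- large case: A's loop converges to the fixed point base + M from below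
    have hb : 4096 ≤ base := by omega
    have hmax : max 4096 (base + 1) = base + 1 := by omega
    have hMge : 2 ≤ M := by omega
    have hMbound : M ≤ 1048834 := by omega
    rw [hmax, ctsLoop_eq base M hb (by omega) (by omega) 2000000 (base + 1)
      (by omega) (by omega) (by omega)]
    have h46 : ¬ (base + M < 4096) := by omega
    rw [if_neg h46]
    have hc := ceil_char (base + M) 4096 (by norm_num)
    have : -(PySem.Int.floordiv (-(base + M)) 4096) = M := by omega
    rw [this]
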